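-- pv_equiv track=rewrite | github.com/YoViajo/cartografia | 04/python/texture_shader/dct.py | bluestein_cost
-- ===== SOURCE A (Python) =====
-- def bluestein_cost(n):
--     # If the convolution in _bluestein() is replaced with a faster algorithm,
--     # then reduce the value of BLUESTEIN_THRESHOLD proportionally:
--     BLUESTEIN_THRESHOLD = 20
--
--     n2 = n + n
--     m = 8
--     mf = 5
--     while m < n:
--         m += m
--         mf += 1
--     m3 = (m * 3) >> 1  # try replacing one factor of 2 with 3
--     if m3 >= n2:
--         m = m3
--     else:
--         m += m
--     mf >>= 1  # number of factors of 4, 2, and 3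
--
--     return BLUESTEIN_THRESHOLD * mf * m, m
-- ===== SOURCE B (Python) =====
-- def bluestein_cost(n):
--     # Closed-form padding size (bit_length) instead of A's doubling loop.
--     BLUESTEIN_THRESHOLD = 20
--     if n <= 8:
--         m, mf = 8, 5
--     else:
--         k = (n - 1).bit_length()
--         m = 1 << k
--         mf = k + 2
--     n2 = n + n
--     m3 = (m * 3) >> 1
--     if m3 >= n2:
--         m = m3
--     else:
--         m += m
--     mf >>= 1
--     return BLUESTEIN_THRESHOLD * mf * m, m
-- ===== Notes on version B (the rewrite author's own statement) =====
-- stated objective: alternative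
-- what changed: The doubling while-loop that finds the power-of-two padding is replaced by a closed-form computation via (n-1).bit_length(), keeping the small arithmetic tail.
import Mathlib
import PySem

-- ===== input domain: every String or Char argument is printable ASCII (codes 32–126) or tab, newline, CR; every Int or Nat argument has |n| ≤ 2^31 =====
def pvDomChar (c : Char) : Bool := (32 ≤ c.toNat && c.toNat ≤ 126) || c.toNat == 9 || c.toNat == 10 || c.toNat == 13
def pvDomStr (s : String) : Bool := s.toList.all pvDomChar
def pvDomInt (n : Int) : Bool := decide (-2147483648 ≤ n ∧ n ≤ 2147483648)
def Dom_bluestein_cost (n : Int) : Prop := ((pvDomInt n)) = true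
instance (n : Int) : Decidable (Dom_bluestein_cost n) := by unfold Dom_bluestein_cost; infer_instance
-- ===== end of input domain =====

-- B replaces A's doubling loop by a closed-form bit-length computation (same values, no speed claim).

-- ===== PORT A =====
-- the while loop of A; fuel bounds the iteration count (m doubles from 8, so n.toNat steps always suffice)
def bluesteinLoopA (fuel : Nat) (n m mf : Int) : Int × Int :=
  match fuel with
  | 0 => (m, mf)
  | f + 1 => if m < n then bluesteinLoopA f n (m + m) (mf + 1) else (m, mf)

def bluestein_cost (n : Int) : Int × Int :=
  let n2 := n + n
  let r := bluesteinLoopA n.toNat n 8 5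
  let m := r.1
  let mf := r.2
  let m3 := PySem.Int.floordiv (m * 3) 2
  let m' := if m3 ≥ n2 then m3 else m + m
  let mf' := PySem.Int.floordiv mf 2
  (20 * mf' * m', m')

-- ===== PORT B =====
def bluestein_cost_alt (n : Int) : Int × Int :=
  let p : Int × Int :=
    if n ≤ 8 then (8, 5)
    else
      let k : Nat := Nat.log2 (n - 1).toNat + 1   -- (n-1).bit_length() for n ≥ 9
      ((2 : Int) ^ k, (k : Int) + 2)
  let m := p.1
  let mf := p.2
  let n2 := n + n
  let m3 := PySem.Int.floordiv (m * 3) 2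
  let m' := if m3 ≥ n2 then m3 else m + m
  let mf' := PySem.Int.floordiv mf 2
  (20 * mf' * m', m')

-- ===== PRECONDITION & SPEC =====
def Spec_bluestein_cost (n : Int) (out : Int × Int) : Prop := out = bluestein_cost_alt n
instance (n : Int) (out : Int × Int) : Decidable (Spec_bluestein_cost n out) := by unfold Spec_bluestein_cost; infer_instance

-- ===== CLAIM (what is proved, stated in full; the proofs are below) =====
def Claim_equal_bluestein_cost : Prop := ∀ (n : Int), Dom_bluestein_cost n → Spec_bluestein_cost n (bluestein_cost n)

-- ===== LEMMAS AND PROOFS =====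

theorem loopA_stop (fuel : Nat) (n m mf : Int) (h : ¬ m < n) :
    bluesteinLoopA fuel n m mf = (m, mf) := by
  cases fuel <;> simp [bluesteinLoopA, h]

-- the loop, started at a power of two below n, ends at the least power of two ≥ n
theorem loopA_pow (fuel : Nat) :
    ∀ (j : Nat) (n mf : Int), (2 : Int) ^ j < n → n ≤ 2 ^ j * 2 ^ fuel →
      ∃ k : Nat, j < k ∧ (2 : Int) ^ (k - 1) < n ∧ n ≤ 2 ^ k ∧
        bluesteinLoopA fuel n ((2 : Int) ^ j) mf = ((2 : Int) ^ k, mf + (k - j : Nat)) := by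
  induction fuel with
  | zero =>
    intro j n mf h1 h2
    simp at h2
    omega
  | succ f ih =>
    intro j n mf h1 h2
    have hstep : bluesteinLoopA (f + 1) n ((2 : Int) ^ j) mf
        = bluesteinLoopA f n ((2 : Int) ^ j + 2 ^ j) (mf + 1) := by
      simp [bluesteinLoopA, h1]
    have hdouble : (2 : Int) ^ j + 2 ^ j = 2 ^ (j + 1) := by ring
    by_cases h3 : (2 : Int) ^ (j + 1) < n
    · have h4 : n ≤ (2 : Int) ^ (j + 1) * 2 ^ f := by
        have : (2 : Int) ^ j * 2 ^ (f + 1) = 2 ^ (j + 1) * 2 ^ f := by ring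
        omega
      obtain ⟨k, hk1, hk2, hk3, hk4⟩ := ih (j + 1) n (mf + 1) h3 h4
      refine ⟨k, by omega, hk2, hk3, ?_⟩
      rw [hstep, hdouble, hk4]
      have : ((k - (j + 1) : Nat) : Int) + 1 = ((k - j : Nat) : Int) := by
        push_cast [Nat.cast_sub (by omega : j + 1 ≤ k), Nat.cast_sub (by omega : j ≤ k)]
        ring
      simp only [Prod.mk.injEq]
      exact ⟨trivial, by omega⟩
    · refine ⟨j + 1, by omega, by simpa using h1, by omega, ?_⟩
      rw [hstep, hdouble, loopA_stop _ _ _ _ (by omega)]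
      simp

theorem pow_le_pow_iff (a b : Nat) (h : (2 : Int) ^ a ≤ 2 ^ b) : a ≤ b := by
  by_contra hc
  have : (2 : Int) ^ b < 2 ^ a := by
    apply pow_lt_pow_right₀ (by norm_num) (by omega)
  omega

-- uniqueness of the exponent with 2^(k-1) < n ≤ 2^k
theorem pow_sandwich_unique (a b : Nat) (n : Int)
    (ha1 : (2 : Int) ^ (a - 1) < n) (ha2 : n ≤ 2 ^ a) (ha : 1 ≤ a)
    (hb1 : (2 : Int) ^ (b - 1) < n) (hb2 : n ≤ 2 ^ b) (hb : 1 ≤ b) : a = b := by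
  have h1 : (2 : Int) ^ (a - 1) < 2 ^ b := lt_of_lt_of_le ha1 hb2
  have h2 : (2 : Int) ^ (b - 1) < 2 ^ a := lt_of_lt_of_le hb1 ha2
  have l1 : a - 1 ≤ b := pow_le_pow_iff _ _ (le_of_lt h1)
  have l2 : b - 1 ≤ a := pow_le_pow_iff _ _ (le_of_lt h2)
  rcases Nat.lt_trichotomy a b with h | h | h
  · exfalso
    have : (2 : Int) ^ a ≤ 2 ^ (b - 1) :=
      pow_le_pow_right₀ (by norm_num) (by omega)
    omega
  · exact h
  · exfalso
    have : (2 : Int) ^ b ≤ 2 ^ (a - 1) :=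
      pow_le_pow_right₀ (by norm_num) (by omega)
    omega

theorem loop_eq_closed (n : Int) (h9 : 9 ≤ n) (hDom : n ≤ 2147483648) :
    bluesteinLoopA n.toNat n 8 5
      = ((2 : Int) ^ (Nat.log2 (n - 1).toNat + 1), ((Nat.log2 (n - 1).toNat + 1 : Nat) : Int) + 2) := by
  -- B's exponent k satisfies 2^(k-1) < n ≤ 2^k
  set x : Nat := (n - 1).toNat with hx
  have hx8 : 8 ≤ x := by omega
  have hxn : (x : Int) = n - 1 := by omega
  set k : Nat := Nat.log2 x + 1 with hk
  have hklb : (2 : Int) ^ (k - 1) < n := by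
    have h := Nat.log2_self_le (n := x) (by omega)
    have h' : (2 : Int) ^ Nat.log2 x ≤ (x : Int) := by exact_mod_cast h
    have hkk : k - 1 = Nat.log2 x := by omega
    rw [hkk]
    omega
  have hkub : n ≤ (2 : Int) ^ k := by
    have h : x < 2 ^ (Nat.log2 x + 1) := Nat.lt_log2_self
    have h' : (x : Int) < (2 : Int) ^ (Nat.log2 x + 1) := by exact_mod_cast h
    rw [hk]
    omega
  -- fuel sufficiency: n ≤ 2^3 * 2^(n.toNat)
  have hfuel : n ≤ (2 : Int) ^ 3 * 2 ^ n.toNat := by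
    have h1 : n.toNat < 2 ^ n.toNat := Nat.lt_two_pow_self
    have h3 : (n : Int) < (2 : Int) ^ n.toNat := by
      calc (n : Int) = (n.toNat : Int) := by omega
        _ < ((2 ^ n.toNat : Nat) : Int) := by exact_mod_cast h1
        _ = (2 : Int) ^ n.toNat := by push_cast; ring
    have hpos : (0 : Int) < (2 : Int) ^ n.toNat := by positivity
    norm_num
    linarith
  have h8 : (8 : Int) = (2 : Int) ^ 3 := by norm_num
  obtain ⟨k', hk'1, hk'2, hk'3, hk'4⟩ :=
    loopA_pow n.toNat 3 n 5 (by omega) hfuel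
  have hkeq : k' = k :=
    pow_sandwich_unique k' k n hk'2 hk'3 (by omega) hklb hkub (by omega)
  rw [h8, hk'4, hkeq]
  have : (5 : Int) + ((k - 3 : Nat) : Int) = (k : Int) + 2 := by
    have : ((k - 3 : Nat) : Int) = (k : Int) - 3 := by
      have : 3 ≤ k := by omega
      push_cast [Nat.cast_sub this]; ring
    omega
  rw [this]

theorem heads_eq (n : Int) (hDom : Dom_bluestein_cost n) :
    bluesteinLoopA n.toNat n 8 5
      = (if n ≤ 8 then ((8 : Int), (5 : Int))
         else ((2 : Int) ^ (Nat.log2 (n - 1).toNat + 1), ((Nat.log2 (n - 1).toNat + 1 : Nat) : Int) + 2)) := by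
  unfold Dom_bluestein_cost pvDomInt at hDom
  simp at hDom
  by_cases h : n ≤ 8
  · rw [loopA_stop _ _ _ _ (by omega)]
    simp [h]
  · rw [if_neg h]
    exact loop_eq_closed n (by omega) (by omega)

-- ===== VERDICT (by name: the statement is the Claim_ definition above) =====
theorem bluestein_cost_spec : Claim_equal_bluestein_cost := by
  intro n hDom
  unfold Spec_bluestein_cost bluestein_cost bluestein_cost_alt
  rw [heads_eq n hDom]
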